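-- pv_equiv track=rewrite | github.com/rookinc/hyperxi_lab | scripts/check_cover_and_base_identification.py | chamber_cover_quotient
-- ===== SOURCE A (Python) =====
-- from collections import Counter, defaultdict, deque
--
-- def chamber_cover_quotient(chamber_adj, chamber_meta):
--     """
--     Quotient chamber graph by forgetting the sheet bit:
--       60 chamber states -> 30 base edges
--     """
--     qadj = defaultdict(set)
--     for u in chamber_adj:
--         eu, _ = chamber_meta[u]
--         for v in chamber_adj[u]:
--             ev, _ = chamber_meta[v]
--             if eu != ev:
--                 qadj[eu].add(ev)
--                 qadj[ev].add(eu)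
--     return {k: set(v) for k, v in qadj.items()}
-- ===== SOURCE B (Python) =====
-- def chamber_cover_quotient(chamber_adj, chamber_meta):
--     """
--     Quotient chamber graph by forgetting the sheet bit, as a gather:
--     project every chamber adjacency to an oriented base pair, drop the
--     self-loops, then compute each base node's neighbour set independently
--     by scanning the projected pair list (per-node gather instead of A's
--     per-pair scatter into a mutated defaultdict).
--     """
--     pairs = [(chamber_meta[u][0], chamber_meta[v][0])
--              for u, nbrs in chamber_adj.items() for v in nbrs]
--     pairs = [(a, b) for a, b in pairs if a != b]
--     keys = list(dict.fromkeys(x for ab in pairs for x in ab))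
--     return {k: {b if a == k else a for a, b in pairs if k in (a, b)}
--             for k in keys}
-- ===== Notes on version B (the rewrite author's own statement) =====
-- stated objective: alternative
-- what changed: A scatters each projected adjacency pair into a mutated defaultdict(set) in one fused loop; B first projects all chamber pairs to a flat list of cross-sheet base pairs, then derives the key list by ordered dedup and computes each base node's neighbour set independently by gathering its partners from that pair list (per-node gather instead of per-pair scatter).
import Mathlib
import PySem

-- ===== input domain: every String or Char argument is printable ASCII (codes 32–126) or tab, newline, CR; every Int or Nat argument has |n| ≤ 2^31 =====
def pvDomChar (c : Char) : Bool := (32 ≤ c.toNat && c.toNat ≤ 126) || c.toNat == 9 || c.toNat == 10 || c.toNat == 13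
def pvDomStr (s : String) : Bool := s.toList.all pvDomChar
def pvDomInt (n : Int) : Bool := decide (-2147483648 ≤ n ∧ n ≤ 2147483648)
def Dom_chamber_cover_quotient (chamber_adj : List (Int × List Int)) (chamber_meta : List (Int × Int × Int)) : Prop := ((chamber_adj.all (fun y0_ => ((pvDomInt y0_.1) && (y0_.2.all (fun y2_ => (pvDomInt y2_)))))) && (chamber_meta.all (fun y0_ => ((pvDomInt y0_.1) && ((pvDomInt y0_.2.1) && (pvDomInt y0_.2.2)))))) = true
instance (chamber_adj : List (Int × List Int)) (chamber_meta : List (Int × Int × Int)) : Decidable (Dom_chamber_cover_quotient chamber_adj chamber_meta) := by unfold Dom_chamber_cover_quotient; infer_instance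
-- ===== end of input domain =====

-- B replaces A's fused per-pair scatter into a mutated defaultdict by a projection pass followed
-- by an independent per-node gather over the projected pair list (objective: alternative).

-- ===== PORT A =====
-- literal transliteration of A: one fused loop over the adjacency dict's pairs mutating a
-- defaultdict(set); chamber_meta[u] ported as Dict.getD under Pre_ (Pre_ excludes the KeyError
-- inputs); the final dict comprehension {k: set(v) …} copies each value set in items order.
def chamber_cover_quotient (chamber_adj : List (Int × List Int)) (chamber_meta : List (Int × Int × Int)) : List (Int × List Int) :=
  let m := PySem.Dict.mk chamber_meta
  let qadj :=
    (PySem.Dict.mk chamber_adj).items.foldl (fun d p =>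
      let eu := (m.getD p.1 (0, 0)).1
      p.2.foldl (fun d v =>
        let ev := (m.getD v (0, 0)).1
        if eu ≠ ev then
          -- qadj[eu].add(ev); qadj[ev].add(eu)  (defaultdict: absent key starts as empty set)
          (d.modify eu PySem.Set.empty (fun s => PySem.Set.add s ev)).modify ev PySem.Set.empty
            (fun s => PySem.Set.add s eu)
        else d) d)
      PySem.Dict.empty
  qadj.items.map (fun kv => (kv.1, PySem.Set.ofList kv.2))

-- ===== PORT B =====
-- literal transliteration of B: project every adjacency pair to an oriented base pair, drop the
-- self-loops, dedup the endpoints in first-seen order (list(dict.fromkeys(…)) = PySem.List.dedup),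
-- then build each node's neighbour set by a gather over the pair list (the set comprehension
-- {b if a == k else a for a, b in pairs if k in (a, b)} = Set.ofList of the filtered/mapped list).
def chamber_cover_quotient_alt (chamber_adj : List (Int × List Int)) (chamber_meta : List (Int × Int × Int)) : List (Int × List Int) :=
  let m := PySem.Dict.mk chamber_meta
  let pairs0 :=
    (PySem.Dict.mk chamber_adj).items.flatMap (fun p =>
      p.2.map (fun v => ((m.getD p.1 (0, 0)).1, (m.getD v (0, 0)).1)))
  let pairs := pairs0.filter (fun e => e.1 ≠ e.2)
  let keys := PySem.List.dedup (pairs.flatMap (fun e => [e.1, e.2]))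
  keys.map (fun k =>
    (k, PySem.Set.ofList ((pairs.filter (fun e => e.1 = k ∨ e.2 = k)).map
          (fun e => if e.1 = k then e.2 else e.1))))

-- ===== PRECONDITION & SPEC =====
-- Pre_ excludes exactly the inputs on which Python A raises KeyError: some chamber named as a key
-- of chamber_adj or inside one of its adjacency lists has no entry in chamber_meta.
def Pre_chamber_cover_quotient (chamber_adj : List (Int × List Int)) (chamber_meta : List (Int × Int × Int)) : Prop :=
  ∀ p ∈ chamber_adj, p.1 ∈ chamber_meta.map (·.1) ∧ ∀ v ∈ p.2, v ∈ chamber_meta.map (·.1)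
instance (chamber_adj : List (Int × List Int)) (chamber_meta : List (Int × Int × Int)) : Decidable (Pre_chamber_cover_quotient chamber_adj chamber_meta) := by unfold Pre_chamber_cover_quotient; infer_instance
def pvWitness_chamber_cover_quotient : (List (Int × List Int)) × (List (Int × Int × Int)) :=
  ([(0, [1, 2]), (1, [0]), (2, [0, 2])], [(0, (10, 0)), (1, (11, 1)), (2, (10, 1))])
def Spec_chamber_cover_quotient (chamber_adj : List (Int × List Int)) (chamber_meta : List (Int × Int × Int)) (out : List (Int × List Int)) : Prop := out = chamber_cover_quotient_alt chamber_adj chamber_meta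
instance (chamber_adj : List (Int × List Int)) (chamber_meta : List (Int × Int × Int)) (out : List (Int × List Int)) : Decidable (Spec_chamber_cover_quotient chamber_adj chamber_meta out) := by unfold Spec_chamber_cover_quotient; infer_instance

-- ===== CLAIM (what is proved, stated in full; the proofs are below) =====
def Claim_equal_chamber_cover_quotient : Prop := ∀ (chamber_adj : List (Int × List Int)) (chamber_meta : List (Int × Int × Int)), Dom_chamber_cover_quotient chamber_adj chamber_meta → Pre_chamber_cover_quotient chamber_adj chamber_meta → Spec_chamber_cover_quotient chamber_adj chamber_meta (chamber_cover_quotient chamber_adj chamber_meta)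

-- ===== LEMMAS AND PROOFS =====

-- the common per-edge update: qadj[a].add(b); qadj[b].add(a)
def pvStep (d : PySem.Dict Int (PySem.Set Int)) (e : Int × Int) : PySem.Dict Int (PySem.Set Int) :=
  (d.modify e.1 PySem.Set.empty (fun s => PySem.Set.add s e.2)).modify e.2 PySem.Set.empty
    (fun s => PySem.Set.add s e.1)

-- the projected, self-loop-free base pair list both programs are really about
def pvPairs (g : Int → Int) (l : List (Int × List Int)) : List (Int × Int) :=
  (l.flatMap (fun p => p.2.map (fun v => (g p.1, g v)))).filter (fun e => e.1 ≠ e.2)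

-- endpoints of the projected pair list, first-seen order (B's key list)
def pvKeys (es : List (Int × Int)) : PySem.Set Int :=
  PySem.Set.ofList (es.flatMap (fun e => [e.1, e.2]))

-- B's gather of one node's neighbours
def pvGather (k : Int) (es : List (Int × Int)) : PySem.Set Int :=
  PySem.Set.ofList ((es.filter (fun e => e.1 = k ∨ e.2 = k)).map
    (fun e => if e.1 = k then e.2 else e.1))

theorem pvGather_of_not_mem_keys {k : Int} {es : List (Int × Int)} (h : k ∉ pvKeys es) :
    pvGather k es = PySem.Set.empty := by
  have hf : es.filter (fun e => e.1 = k ∨ e.2 = k) = [] := by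
    rw [List.filter_eq_nil_iff]
    intro e he hp
    apply h
    simp only [pvKeys, PySem.Set.mem_ofList, List.mem_flatMap]
    exact ⟨e, he, by rcases of_decide_eq_true hp with h1 | h1 <;> simp [h1]⟩
  unfold pvGather
  rw [hf]
  rfl

-- a gather collapses its absent-key default through any key superset
theorem pvIfMemS (k : Int) (es : List (Int × Int)) (S : List Int)
    (hS : k ∈ pvKeys es → k ∈ S) :
    (if k ∈ S then pvGather k es else PySem.Set.empty) = pvGather k es := by
  by_cases hm : k ∈ S
  · rw [if_pos hm]
  · rw [if_neg hm, pvGather_of_not_mem_keys (fun h' => hm (hS h'))]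

-- items of one defaultdict modify, described against an abstract item table
theorem pvItems_modify (D : PySem.Dict Int (PySem.Set Int)) (K : List Int)
    (G : Int → PySem.Set Int) (x : Int) (f : PySem.Set Int → PySem.Set Int)
    (hK : K.Nodup) (hI : D.items = K.map (fun k => (k, G k))) :
    (D.modify x PySem.Set.empty f).items
      = (PySem.Set.add K x).map (fun k =>
          (k, if k = x then f (if x ∈ K then G x else PySem.Set.empty) else G k)) := by
  have hkeys : D.keys = K := by
    show D.items.map (·.1) = K
    rw [hI]; simp [Function.comp_def]
  have hknd : D.keys.Nodup := hkeys ▸ hK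
  have hcon : D.contains x = decide (x ∈ K) := by
    rw [PySem.Dict.contains_eq_decide_mem_keys, hkeys]
  by_cases hx : x ∈ K
  · have hget : D.getD x PySem.Set.empty = G x := by
      apply PySem.Dict.getD_of_mem_items _ _ hknd
      rw [hI]; exact List.mem_map.2 ⟨x, hx, rfl⟩
    show (D.insert x (f (D.getD x PySem.Set.empty))).items = _
    rw [PySem.Dict.items_insert_of_contains _ _ (by simp [hcon, hx]), hI, hget,
      PySem.Set.add_of_mem hx, List.map_map]
    apply List.map_congr_left
    intro k hk
    by_cases hkx : k = x <;> simp [hkx, hx]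
  · have hget : D.getD x PySem.Set.empty = PySem.Set.empty :=
      PySem.Dict.getD_of_not_contains _ _ (by simp [hcon, hx])
    show (D.insert x (f (D.getD x PySem.Set.empty))).items = _
    rw [PySem.Dict.items_insert_of_not_contains _ _ (by simp [hcon, hx]), hI, hget,
      PySem.Set.add_of_not_mem hx, List.map_append]
    congr 1
    · apply List.map_congr_left
      intro k hk
      have hne : k ≠ x := fun hh => hx (hh ▸ hk)
      simp [hne]
    · simp [hx]

theorem pvKeys_snoc (es : List (Int × Int)) (e : Int × Int) :
    pvKeys (es ++ [e]) = PySem.Set.add (PySem.Set.add (pvKeys es) e.1) e.2 := by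
  unfold pvKeys
  simp only [List.flatMap_append, List.flatMap_cons, List.flatMap_nil, List.append_nil]
  rw [show (es.flatMap fun e => [e.1, e.2]) ++ [e.1, e.2]
      = ((es.flatMap fun e => [e.1, e.2]) ++ [e.1]) ++ [e.2] by simp,
    PySem.Set.ofList_append_singleton, PySem.Set.ofList_append_singleton]

theorem pvGather_snoc (k : Int) (es : List (Int × Int)) (e : Int × Int) :
    pvGather k (es ++ [e]) =
      if e.1 = k ∨ e.2 = k then PySem.Set.add (pvGather k es) (if e.1 = k then e.2 else e.1)
      else pvGather k es := by
  unfold pvGather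
  rw [List.filter_append]
  by_cases hp : e.1 = k ∨ e.2 = k
  · rw [if_pos hp]
    have hf : List.filter (fun e => decide (e.1 = k ∨ e.2 = k)) [e] = [e] := by simp [hp]
    rw [hf, List.map_append, List.map_cons, List.map_nil,
      PySem.Set.ofList_append_singleton]
  · rw [if_neg hp]
    have hf : List.filter (fun e => decide (e.1 = k ∨ e.2 = k)) [e] = [] := by simp [hp]
    rw [hf, List.append_nil]

-- the main invariant: A's scatter fold materialises exactly B's per-node gather table
theorem pvMainInv (es : List (Int × Int)) (h : ∀ e ∈ es, e.1 ≠ e.2) :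
    (es.foldl pvStep PySem.Dict.empty).items
      = (pvKeys es).map (fun k => (k, pvGather k es)) := by
  induction es using List.reverseRecOn with
  | nil => rfl
  | append_singleton es e ih =>
    have he : e.1 ≠ e.2 := h e (by simp)
    have ih' := ih (fun e' h' => h e' (by simp [h']))
    rw [List.foldl_append, List.foldl_cons, List.foldl_nil]
    show (((es.foldl pvStep PySem.Dict.empty).modify e.1 PySem.Set.empty
        (fun s => PySem.Set.add s e.2)).modify e.2 PySem.Set.empty
        (fun s => PySem.Set.add s e.1)).items = _
    have hK : (pvKeys es).Nodup := PySem.Set.nodup_ofList _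
    have h1 := pvItems_modify (es.foldl pvStep PySem.Dict.empty) (pvKeys es)
      (fun k => pvGather k es) e.1 (fun s => PySem.Set.add s e.2) hK ih'
    simp only [pvIfMemS e.1 es (pvKeys es) (fun hh => hh)] at h1
    have h2 := pvItems_modify _ (PySem.Set.add (pvKeys es) e.1)
      (fun k => if k = e.1 then PySem.Set.add (pvGather e.1 es) e.2 else pvGather k es)
      e.2 (fun s => PySem.Set.add s e.1) (PySem.Set.nodup_add _ _ hK) h1
    rw [h2, pvKeys_snoc]
    apply List.map_congr_left
    intro k hk
    simp only []
    rw [pvGather_snoc]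
    by_cases hk2 : k = e.2
    · subst hk2
      have hne : e.2 ≠ e.1 := fun hh => he hh.symm
      by_cases hm : e.2 ∈ pvKeys es
      · simp [hne, he, hm]
      · simp [hne, he, hm, pvGather_of_not_mem_keys hm]
    · by_cases hk1 : k = e.1
      · subst hk1
        simp [hk2]
      · simp [hk1, hk2, Ne.symm hk1, Ne.symm hk2]

-- A's inner loop = a fold of pvStep over one chamber's projected, self-loop-free pairs
theorem pvInnerFlat (g : Int → Int) (eu : Int) (nbrs : List Int) :
    ∀ d, nbrs.foldl (fun d v => if eu ≠ g v then pvStep d (eu, g v) else d) d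
      = ((nbrs.map (fun v => (eu, g v))).filter (fun e => e.1 ≠ e.2)).foldl pvStep d := by
  induction nbrs with
  | nil => intro d; rfl
  | cons v ns ih =>
    intro d
    rw [List.foldl_cons, List.map_cons, List.filter_cons]
    by_cases hne : eu ≠ g v
    · rw [if_pos hne, if_pos (by simpa using hne), List.foldl_cons]
      exact ih _
    · rw [if_neg hne, if_neg (by simpa using hne)]
      exact ih _

-- A's nested loops = a fold of pvStep over the projected, self-loop-free pair list
theorem pvFlatten (g : Int → Int) (l : List (Int × List Int)) :
    ∀ d, l.foldl (fun d p =>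
        p.2.foldl (fun d v => if g p.1 ≠ g v then pvStep d (g p.1, g v) else d) d) d
      = (pvPairs g l).foldl pvStep d := by
  induction l with
  | nil => intro d; rfl
  | cons p l ih =>
    intro d
    unfold pvPairs
    rw [List.foldl_cons, List.flatMap_cons, List.filter_append, List.foldl_append,
      pvInnerFlat g (g p.1) p.2 d]
    exact ih _

-- assembling both ports around the pair list
theorem pvFinal (g : Int → Int) (l : List (Int × List Int)) :
    (l.foldl (fun d p =>
        p.2.foldl (fun d v => if g p.1 ≠ g v then pvStep d (g p.1, g v) else d) d)
        PySem.Dict.empty).items.map (fun kv => (kv.1, PySem.Set.ofList kv.2))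
      = (PySem.List.dedup ((pvPairs g l).flatMap (fun e => [e.1, e.2]))).map (fun k =>
          (k, PySem.Set.ofList (((pvPairs g l).filter (fun e => e.1 = k ∨ e.2 = k)).map
            (fun e => if e.1 = k then e.2 else e.1)))) := by
  rw [pvFlatten g l PySem.Dict.empty,
    pvMainInv (pvPairs g l) (fun e he => by simpa using (List.mem_filter.1 he).2),
    List.map_map, PySem.List.dedup_eq_ofList]
  unfold pvKeys pvGather
  apply List.map_congr_left
  intro k hk
  simp [PySem.Set.ofList_ofList]

-- ===== VERDICT (by name: the statement is the Claim_ definition above) =====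
theorem chamber_cover_quotient_spec : Claim_equal_chamber_cover_quotient := by
  intro chamber_adj chamber_meta _ _
  unfold Spec_chamber_cover_quotient
  exact pvFinal (fun v => ((PySem.Dict.mk chamber_meta).getD v (0, 0)).1)
    (PySem.Dict.mk chamber_adj).items
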